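-- pv_equiv track=rewrite | github.com/Gezraf/CollegeProjects-GuyShitrit | Semester1/TCB/Python And Cryptography/ClassWork/Answers/lab7_GuyShitrit.py | Q1c
-- ===== SOURCE A (Python) =====
-- def Q1c(num):
--     f11 = lambda n: n % 2 == 0           # האם מספר זוגי
--     f12 = lambda n: n % 10               # ספרה אחרונה
--     f13 = lambda n: n // 10              # הורדת ספרה אחרונה
--     f14 = lambda n: n * 10               # הכפלה ב-10
--     f15 = lambda n, digit: n + digit   # הוספת ספרה לסוף
--
--     def f16(n):  # מחזיר פרמטר עם סדר ספרות הפוך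
--         reversed_num = 0
--         while n != 0:
--             digit = f12(n)
--             reversed_num = f15(f14(reversed_num), digit)
--             n = f13(n)
--         return reversed_num
--
--     reversed_num = f16(num)
--
--     res = 0
--     while reversed_num != 0:
--         digit = f12(reversed_num)
--         if f11(digit):                       # אם הספרה זוגית
--             res = f15(f14(res), digit)       # res = res * 10 + digit
--         reversed_num = f13(reversed_num)
--
--     return res
-- ===== SOURCE B (Python) =====
-- def Q1c(num):
--     # Single most-significant-first recursive pass: no reversal step.
--     def go(n):
--         if n == 0:
--             return 0
--         res = go(n // 10)
--         d = n % 10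
--         return res * 10 + d if d % 2 == 0 else res
--     return go(num)
-- ===== Notes on version B (the rewrite author's own statement) =====
-- stated objective: simpler
-- what changed: Replaces A's two while-loops (reverse the digits arithmetically, then re-reverse while filtering) by a single most-significant-first recursion that appends each even digit directly, so the reversal pass disappears.
-- intended difference: On positive inputs that end in a zero digit and also contain a nonzero even digit, A's reversal step silently drops the trailing zeros from the result, while B keeps every even digit in order, which is the intended value (the diff witness shows both outputs). — e.g. on Q1c(20): A returns 2, B returns 20
import Mathlib
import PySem

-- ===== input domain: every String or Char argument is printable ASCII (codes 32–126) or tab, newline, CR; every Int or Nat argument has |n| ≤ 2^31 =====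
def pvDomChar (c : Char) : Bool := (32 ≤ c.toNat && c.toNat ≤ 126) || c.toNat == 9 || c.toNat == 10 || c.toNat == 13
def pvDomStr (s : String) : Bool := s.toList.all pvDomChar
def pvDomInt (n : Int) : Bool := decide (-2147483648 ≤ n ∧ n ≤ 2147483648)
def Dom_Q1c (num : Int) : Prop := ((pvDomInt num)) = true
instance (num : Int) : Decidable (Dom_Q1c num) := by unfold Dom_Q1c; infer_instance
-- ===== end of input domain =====

-- B replaces A's reverse-then-filter double loop by one most-significant-first recursive pass (simpler; same cost).

-- ===== PORT A =====
-- f16's while-loop; fuel only makes the Python while-loop total (adequate whenever num ≥ 0, i.e. on Pre_)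
def Q1c_f16 (fuel : Nat) (n reversed_num : Int) : Int :=
  match fuel with
  | 0 => reversed_num
  | fuel + 1 =>
    if n ≠ 0 then
      Q1c_f16 fuel (PySem.Int.floordiv n 10) (reversed_num * 10 + PySem.Int.mod n 10)
    else reversed_num

-- the second while-loop of A
def Q1c_resLoop (fuel : Nat) (reversed_num res : Int) : Int :=
  match fuel with
  | 0 => res
  | fuel + 1 =>
    if reversed_num ≠ 0 then
      let digit := PySem.Int.mod reversed_num 10
      Q1c_resLoop fuel (PySem.Int.floordiv reversed_num 10)
        (if PySem.Int.mod digit 2 = 0 then res * 10 + digit else res)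
    else res

def Q1c (num : Int) : Int :=
  let reversed_num := Q1c_f16 (num.natAbs + 1) num 0
  Q1c_resLoop (num.natAbs + 1) reversed_num 0

-- ===== PORT B =====
-- go's recursion; fuel only makes the Python recursion total (adequate whenever num ≥ 0, i.e. on Pre_)
def Q1c_go (fuel : Nat) (n : Int) : Int :=
  match fuel with
  | 0 => 0
  | fuel + 1 =>
    if n = 0 then 0
    else
      let res := Q1c_go fuel (PySem.Int.floordiv n 10)
      let d := PySem.Int.mod n 10
      if PySem.Int.mod d 2 = 0 then res * 10 + d else res

def Q1c_alt (num : Int) : Int := Q1c_go (num.natAbs + 1) num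

-- ===== PRECONDITION & SPEC =====
-- Pre_ excludes negative num, on which A's first while-loop never terminates (n // 10 fixes at -1).
def Pre_Q1c (num : Int) : Prop := 0 ≤ num
instance (num : Int) : Decidable (Pre_Q1c num) := by unfold Pre_Q1c; infer_instance
def pvWitness_Q1c : Int := 123456

-- On positive inputs that end in a zero digit and also contain a nonzero even digit, A's reversal step
-- silently drops the trailing zeros from the result, while B keeps every even digit in order, which is
-- the intended value (the diff witness shows both outputs).
def D_Q1c (num : Int) : Prop :=
  num ≠ 0 ∧ num % 10 = 0 ∧
    ∃ k ∈ List.range 11, (num.natAbs / 10 ^ k) % 10 % 2 = 0 ∧ (num.natAbs / 10 ^ k) % 10 ≠ 0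
instance (num : Int) : Decidable (D_Q1c num) := by unfold D_Q1c; infer_instance

def Spec_Q1c (num : Int) (out : Int) : Prop := ¬ D_Q1c num → out = Q1c_alt num
instance (num : Int) (out : Int) : Decidable (Spec_Q1c num out) := by unfold Spec_Q1c; infer_instance

def pvDiffWitness_Q1c : Int := 20
def pvDiffWitnessOut_Q1c : Int × Int := (2, 20)

-- ===== CLAIM (what is proved, stated in full; the proofs are below) =====
def Claim_unchanged_Q1c : Prop := ∀ (num : Int), Dom_Q1c num → Pre_Q1c num → Spec_Q1c num (Q1c num)
def Claim_changed_Q1c : Prop := Dom_Q1c (pvDiffWitness_Q1c) ∧ Pre_Q1c (pvDiffWitness_Q1c) ∧ D_Q1c (pvDiffWitness_Q1c) ∧ Q1c (pvDiffWitness_Q1c) = pvDiffWitnessOut_Q1c.1 ∧ Q1c_alt (pvDiffWitness_Q1c) = pvDiffWitnessOut_Q1c.2 ∧ pvDiffWitnessOut_Q1c.1 ≠ pvDiffWitnessOut_Q1c.2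
def Claim_exact_Q1c : Prop := ∀ (num : Int), Dom_Q1c num → Pre_Q1c num → D_Q1c num → Q1c num ≠ Q1c_alt num

-- ===== LEMMAS AND PROOFS =====

-- Nat models of the loops
def pvR (n acc : Nat) : Nat :=
  if h : n = 0 then acc else pvR (n / 10) (acc * 10 + n % 10)
termination_by n
decreasing_by exact Nat.div_lt_self (Nat.pos_of_ne_zero h) (by norm_num)

def pvS (n acc : Nat) : Nat :=
  if h : n = 0 then acc
  else pvS (n / 10) (if n % 10 % 2 = 0 then acc * 10 + n % 10 else acc)
termination_by n
decreasing_by exact Nat.div_lt_self (Nat.pos_of_ne_zero h) (by norm_num)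

def pvE (n : Nat) : Nat :=
  if h : n = 0 then 0
  else if n % 10 % 2 = 0 then pvE (n / 10) * 10 + n % 10 else pvE (n / 10)
termination_by n
decreasing_by all_goals exact Nat.div_lt_self (Nat.pos_of_ne_zero h) (by norm_num)

def pvStrip (n : Nat) : Nat :=
  if h : n = 0 then 0 else if n % 10 = 0 then pvStrip (n / 10) else n
termination_by n
decreasing_by exact Nat.div_lt_self (Nat.pos_of_ne_zero h) (by norm_num)

def pvTZ (n : Nat) : Nat :=
  if h : n = 0 then 0 else if n % 10 = 0 then pvTZ (n / 10) + 1 else 0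
termination_by n
decreasing_by exact Nat.div_lt_self (Nat.pos_of_ne_zero h) (by norm_num)

def pvHasNZ (n : Nat) : Bool :=
  if h : n = 0 then false
  else (decide (n % 10 % 2 = 0 ∧ n % 10 ≠ 0)) || pvHasNZ (n / 10)
termination_by n
decreasing_by exact Nat.div_lt_self (Nat.pos_of_ne_zero h) (by norm_num)

theorem pv_div_pow_lt {f n : Nat} (h : n < 10 ^ (f + 1)) : n / 10 < 10 ^ f := by
  apply (Nat.div_lt_iff_lt_mul (by norm_num : 0 < 10)).mpr
  calc n < 10 ^ (f + 1) := h
    _ = 10 ^ f * 10 := by ring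

theorem pv_fd (n : Nat) : PySem.Int.floordiv (n : Int) 10 = ((n / 10 : Nat) : Int) := by
  exact_mod_cast PySem.Int.floordiv_natCast n 10

theorem pv_md (n : Nat) : PySem.Int.mod (n : Int) 10 = ((n % 10 : Nat) : Int) := by
  exact_mod_cast PySem.Int.mod_natCast n 10

theorem pv_md2 (n : Nat) : PySem.Int.mod (n : Int) 2 = ((n % 2 : Nat) : Int) := by
  exact_mod_cast PySem.Int.mod_natCast n 2

theorem pv_even_iff (n : Nat) : PySem.Int.mod ((n : Nat) : Int) 2 = 0 ↔ n % 2 = 0 := by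
  rw [pv_md2]; exact_mod_cast Iff.rfl

-- bridge: port loops compute the Nat models (on nonnegative state, with enough fuel)
theorem pv_f16_bridge : ∀ (f : Nat) (n acc : Nat), n < 10 ^ f →
    Q1c_f16 f (n : Int) (acc : Int) = (pvR n acc : Int) := by
  intro f
  induction f with
  | zero =>
    intro n acc h
    have h0 : (10:Nat) ^ 0 = 1 := pow_zero 10
    have : n = 0 := by omega
    subst this
    rw [pvR, dif_pos rfl, Q1c_f16]
  | succ f ih =>
    intro n acc h
    by_cases hn : n = 0
    · subst hn; rw [pvR, dif_pos rfl, Q1c_f16]; simp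
    · rw [Q1c_f16]
      have hc : (n : Int) ≠ 0 := by exact_mod_cast hn
      rw [if_pos hc, pv_fd, pv_md]
      have harg : (acc : Int) * 10 + ((n % 10 : Nat) : Int) = ((acc * 10 + n % 10 : Nat) : Int) := by
        push_cast; ring
      rw [harg, ih _ _ (pv_div_pow_lt h)]
      conv_rhs => rw [pvR, dif_neg hn]

theorem pv_resLoop_bridge : ∀ (f : Nat) (n acc : Nat), n < 10 ^ f →
    Q1c_resLoop f (n : Int) (acc : Int) = (pvS n acc : Int) := by
  intro f
  induction f with
  | zero =>
    intro n acc h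
    have h0 : (10:Nat) ^ 0 = 1 := pow_zero 10
    have : n = 0 := by omega
    subst this
    rw [pvS, dif_pos rfl, Q1c_resLoop]
  | succ f ih =>
    intro n acc h
    by_cases hn : n = 0
    · subst hn; rw [pvS, dif_pos rfl, Q1c_resLoop]; simp
    · rw [Q1c_resLoop]
      have hc : (n : Int) ≠ 0 := by exact_mod_cast hn
      rw [if_pos hc]
      simp only [pv_fd, pv_md]
      have harg : (if PySem.Int.mod ((n % 10 : Nat) : Int) 2 = 0 then (acc : Int) * 10 + ((n % 10 : Nat) : Int) else (acc : Int)) = ((if n % 10 % 2 = 0 then acc * 10 + n % 10 else acc : Nat) : Int) := by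
        by_cases he : n % 10 % 2 = 0
        · rw [if_pos ((pv_even_iff (n % 10)).mpr he), if_pos he]
          push_cast; ring
        · rw [if_neg (fun hx => he ((pv_even_iff (n % 10)).mp hx)), if_neg he]
      rw [harg, ih _ _ (pv_div_pow_lt h)]
      conv_rhs => rw [pvS, dif_neg hn]

theorem pv_go_bridge : ∀ (f : Nat) (n : Nat), n < 10 ^ f →
    Q1c_go f (n : Int) = (pvE n : Int) := by
  intro f
  induction f with
  | zero =>
    intro n h
    have h0 : (10:Nat) ^ 0 = 1 := pow_zero 10
    have : n = 0 := by omega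
    subst this
    rw [pvE, dif_pos rfl, Q1c_go]
    simp
  | succ f ih =>
    intro n h
    by_cases hn : n = 0
    · subst hn; rw [pvE, dif_pos rfl, Q1c_go]; simp
    · rw [Q1c_go]
      have hc : ¬ ((n : Int) = 0) := by exact_mod_cast hn
      rw [if_neg hc]
      simp only [pv_fd, pv_md]
      rw [ih _ (pv_div_pow_lt h)]
      conv_rhs => rw [pvE, dif_neg hn]
      by_cases he : n % 10 % 2 = 0
      · rw [if_pos ((pv_even_iff (n % 10)).mpr he), if_pos he]
        push_cast; ring
      · rw [if_neg (fun hx => he ((pv_even_iff (n % 10)).mp hx)), if_neg he]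

-- bound on the reversal's value: it fits in the same number of digits
theorem pv_R_bound : ∀ (f n acc : Nat), n < 10 ^ f → pvR n acc < (acc + 1) * 10 ^ f := by
  intro f
  induction f with
  | zero =>
    intro n acc h
    have h0 : (10:Nat) ^ 0 = 1 := pow_zero 10
    have : n = 0 := by omega
    subst this
    rw [pvR, dif_pos rfl]; simp
  | succ f ih =>
    intro n acc h
    by_cases hn : n = 0
    · subst hn
      rw [pvR, dif_pos rfl]
      have hp : 1 ≤ 10 ^ (f + 1) := Nat.one_le_pow _ _ (by norm_num)
      nlinarith
    · rw [pvR, dif_neg hn]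
      have h1 := ih (n / 10) (acc * 10 + n % 10) (pv_div_pow_lt h)
      have h2 : n % 10 < 10 := Nat.mod_lt _ (by norm_num)
      calc pvR (n / 10) (acc * 10 + n % 10) < (acc * 10 + n % 10 + 1) * 10 ^ f := h1
        _ ≤ (acc + 1) * 10 * 10 ^ f := by
            have : acc * 10 + n % 10 + 1 ≤ (acc + 1) * 10 := by omega
            exact Nat.mul_le_mul_right _ this
        _ = (acc + 1) * 10 ^ (f + 1) := by ring

-- the accumulator form of B's recursion, used to run A's second loop "backwards"
def pvE2 (n res : Nat) : Nat :=
  if h : n = 0 then res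
  else
    if n % 10 % 2 = 0 then pvE2 (n / 10) res * 10 + n % 10 else pvE2 (n / 10) res
termination_by n
decreasing_by all_goals exact Nat.div_lt_self (Nat.pos_of_ne_zero h) (by norm_num)

theorem pvE2_zero_acc : ∀ n, pvE2 n 0 = pvE n := by
  intro n
  induction n using Nat.strong_induction_on with
  | _ n ih =>
    by_cases hn : n = 0
    · subst hn; simp [pvE2, pvE]
    · rw [pvE2, pvE, dif_neg hn, dif_neg hn,
        ih (n / 10) (Nat.div_lt_self (Nat.pos_of_ne_zero hn) (by norm_num))]

-- key: A's second loop applied to the reversal peels digits back in original order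
theorem pv_S_R : ∀ n acc res, acc ≠ 0 → pvS (pvR n acc) res = pvS acc (pvE2 n res) := by
  intro n
  induction n using Nat.strong_induction_on with
  | _ n ih =>
    intro acc res hacc
    by_cases hn : n = 0
    · subst hn
      rw [pvR, dif_pos rfl, pvE2, dif_pos rfl]
    · rw [pvR, dif_neg hn]
      have hacc' : acc * 10 + n % 10 ≠ 0 := by
        have : 1 ≤ acc := Nat.pos_of_ne_zero hacc
        omega
      rw [ih (n / 10) (Nat.div_lt_self (Nat.pos_of_ne_zero hn) (by norm_num)) _ res hacc']
      have hd : n % 10 < 10 := Nat.mod_lt _ (by norm_num)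
      conv_lhs => rw [pvS, dif_neg hacc']
      have hdiv : (acc * 10 + n % 10) / 10 = acc := by omega
      have hmod : (acc * 10 + n % 10) % 10 = n % 10 := by omega
      rw [hdiv, hmod,
        show pvE2 n res = if n % 10 % 2 = 0 then pvE2 (n / 10) res * 10 + n % 10
            else pvE2 (n / 10) res from by rw [pvE2, dif_neg hn]]

theorem pv_strip_mod (n : Nat) : pvStrip n ≠ 0 → pvStrip n % 10 ≠ 0 := by
  induction n using Nat.strong_induction_on with
  | _ n ih =>
    intro hs
    by_cases hn : n = 0
    · subst hn; simp [pvStrip] at hs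
    · rw [pvStrip, dif_neg hn] at hs ⊢
      by_cases hm : n % 10 = 0
      · rw [if_pos hm] at hs ⊢
        exact ih (n / 10) (Nat.div_lt_self (Nat.pos_of_ne_zero hn) (by norm_num)) hs
      · rw [if_neg hm]; exact hm

theorem pv_R_strip : ∀ n, pvR n 0 = pvR (pvStrip n) 0 := by
  intro n
  induction n using Nat.strong_induction_on with
  | _ n ih =>
    by_cases hn : n = 0
    · subst hn; simp [pvStrip]
    · rw [pvStrip, dif_neg hn]
      by_cases hm : n % 10 = 0
      · rw [if_pos hm]
        conv_lhs => rw [pvR, dif_neg hn]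
        rw [hm]
        simpa using ih (n / 10) (Nat.div_lt_self (Nat.pos_of_ne_zero hn) (by norm_num))
      · rw [if_neg hm]

theorem pv_SR_eq_E (m : Nat) (hmd : m = 0 ∨ m % 10 ≠ 0) : pvS (pvR m 0) 0 = pvE m := by
  rcases hmd with hm0 | hmd
  · subst hm0; simp [pvR, pvS, pvE]
  · have hm0 : m ≠ 0 := fun h => hmd (by subst h; rfl)
    conv_lhs => rw [pvR, dif_neg hm0]
    simp only [Nat.zero_mul, Nat.zero_add]
    rw [pv_S_R (m / 10) (m % 10) 0 hmd]
    have hd : m % 10 < 10 := Nat.mod_lt _ (by norm_num)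
    conv_lhs => rw [pvS, dif_neg hmd]
    have hdiv : m % 10 / 10 = 0 := by omega
    have hmodd : m % 10 % 10 = m % 10 := by omega
    rw [hdiv, hmodd, pvS, dif_pos rfl, pvE2_zero_acc]
    conv_rhs => rw [pvE, dif_neg hm0]

-- A computes pvE of the trailing-zero-stripped input
theorem pv_A_char (n : Nat) : pvS (pvR n 0) 0 = pvE (pvStrip n) := by
  rw [pv_R_strip n]
  apply pv_SR_eq_E
  by_cases h : pvStrip n = 0
  · exact Or.inl h
  · exact Or.inr (pv_strip_mod n h)

-- B's value factors through the stripped input and the trailing-zero count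
theorem pv_E_strip : ∀ n, pvE n = pvE (pvStrip n) * 10 ^ pvTZ n := by
  intro n
  induction n using Nat.strong_induction_on with
  | _ n ih =>
    by_cases hn : n = 0
    · subst hn; simp [pvStrip, pvTZ]
    · rw [pvStrip, dif_neg hn, pvTZ, dif_neg hn]
      by_cases hm : n % 10 = 0
      · rw [if_pos hm, if_pos hm]
        rw [pvE, dif_neg hn, hm]
        rw [if_pos (by norm_num), ih (n / 10) (Nat.div_lt_self (Nat.pos_of_ne_zero hn) (by norm_num))]
        ring
      · rw [if_neg hm, if_neg hm]; simp

theorem pv_hasNZ_strip : ∀ n, pvHasNZ (pvStrip n) = pvHasNZ n := by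
  intro n
  induction n using Nat.strong_induction_on with
  | _ n ih =>
    by_cases hn : n = 0
    · subst hn; simp [pvStrip]
    · rw [pvStrip, dif_neg hn]
      by_cases hm : n % 10 = 0
      · rw [if_pos hm, ih (n / 10) (Nat.div_lt_self (Nat.pos_of_ne_zero hn) (by norm_num))]
        conv_rhs => rw [pvHasNZ, dif_neg hn]
        simp [hm]
      · rw [if_neg hm]

theorem pv_E_eq_zero_of_not_hasNZ : ∀ n, pvHasNZ n = false → pvE n = 0 := by
  intro n
  induction n using Nat.strong_induction_on with
  | _ n ih =>
    intro h
    by_cases hn : n = 0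
    · subst hn; simp [pvE]
    · rw [pvHasNZ, dif_neg hn] at h
      simp only [Bool.or_eq_false_iff, decide_eq_false_iff_not] at h
      obtain ⟨h1, h2⟩ := h
      have hrec := ih (n / 10) (Nat.div_lt_self (Nat.pos_of_ne_zero hn) (by norm_num)) h2
      rw [pvE, dif_neg hn, hrec]
      by_cases he : n % 10 % 2 = 0
      · rw [if_pos he]
        have : n % 10 = 0 := by
          by_contra hc
          exact h1 ⟨he, hc⟩
        omega
      · rw [if_neg he]

theorem pv_E_ne_zero_of_hasNZ : ∀ n, pvHasNZ n = true → pvE n ≠ 0 := by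
  intro n
  induction n using Nat.strong_induction_on with
  | _ n ih =>
    intro h
    by_cases hn : n = 0
    · subst hn; simp [pvHasNZ] at h
    · rw [pvHasNZ, dif_neg hn] at h
      rw [pvE, dif_neg hn]
      simp only [Bool.or_eq_true, decide_eq_true_eq] at h
      rcases h with ⟨he, hnz⟩ | h
      · rw [if_pos he]; omega
      · have hrec := ih (n / 10) (Nat.div_lt_self (Nat.pos_of_ne_zero hn) (by norm_num)) h
        by_cases he : n % 10 % 2 = 0
        · rw [if_pos he]; omega
        · rw [if_neg he]; exact hrec

-- connect pvHasNZ with the positional form used by D_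
theorem pv_hasNZ_iff : ∀ n, pvHasNZ n = true ↔ ∃ k, (n / 10 ^ k) % 10 % 2 = 0 ∧ (n / 10 ^ k) % 10 ≠ 0 := by
  intro n
  induction n using Nat.strong_induction_on with
  | _ n ih =>
    by_cases hn : n = 0
    · subst hn
      simp [pvHasNZ]
    · rw [pvHasNZ, dif_neg hn]
      simp only [Bool.or_eq_true, decide_eq_true_eq]
      rw [ih (n / 10) (Nat.div_lt_self (Nat.pos_of_ne_zero hn) (by norm_num))]
      constructor
      · rintro (⟨he, hz⟩ | ⟨k, hk⟩)
        · exact ⟨0, by rw [pow_zero, Nat.div_one]; exact he,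
            by rw [pow_zero, Nat.div_one]; exact hz⟩
        · refine ⟨k + 1, ?_⟩
          rwa [pow_succ, Nat.mul_comm, ← Nat.div_div_eq_div_mul]
      · rintro ⟨k, hk⟩
        match k with
        | 0 =>
          rw [pow_zero, Nat.div_one] at hk
          exact Or.inl hk
        | k + 1 =>
          refine Or.inr ⟨k, ?_⟩
          rwa [pow_succ, Nat.mul_comm, ← Nat.div_div_eq_div_mul] at hk

theorem pv_hasNZ_iff_bounded (n : Nat) (hb : n < 10 ^ 11) :
    pvHasNZ n = true ↔ ∃ k ∈ List.range 11, (n / 10 ^ k) % 10 % 2 = 0 ∧ (n / 10 ^ k) % 10 ≠ 0 := by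
  rw [pv_hasNZ_iff]
  constructor
  · rintro ⟨k, hk⟩
    by_cases hk11 : k < 11
    · exact ⟨k, List.mem_range.mpr hk11, hk⟩
    · exfalso
      have h1 : 10 ^ 11 ≤ 10 ^ k := Nat.pow_le_pow_right (by norm_num) (by omega)
      have h2 : n / 10 ^ k = 0 := Nat.div_eq_of_lt (by omega)
      rw [h2] at hk
      simp at hk
  · rintro ⟨k, _, hk⟩
    exact ⟨k, hk⟩

theorem pv_fuel_adequate (n : Nat) : n < 10 ^ (n + 1) := by
  have h1 : n < 10 ^ n := Nat.lt_pow_self (by norm_num)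
  calc n < 10 ^ n := h1
    _ ≤ 10 ^ (n + 1) := Nat.pow_le_pow_right (by norm_num) (Nat.le_succ _)

-- the two port values, for nonnegative input, as the Nat models
theorem pv_Q1c_eq (n : Nat) : Q1c (n : Int) = (pvS (pvR n 0) 0 : Int) := by
  have hfa : n < 10 ^ (n + 1) := pv_fuel_adequate n
  unfold Q1c
  rw [Int.natAbs_natCast]
  rw [show ((0 : Int)) = ((0 : Nat) : Int) from rfl]
  rw [pv_f16_bridge (n + 1) n 0 hfa]
  exact pv_resLoop_bridge (n + 1) (pvR n 0) 0 (by simpa using pv_R_bound (n + 1) n 0 hfa)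

theorem pv_Q1c_alt_eq (n : Nat) : Q1c_alt (n : Int) = (pvE n : Int) := by
  unfold Q1c_alt
  rw [Int.natAbs_natCast]
  exact pv_go_bridge (n + 1) n (pv_fuel_adequate n)

theorem pv_dom_bound (n : Nat) (hdom : Dom_Q1c (n : Int)) : n < 10 ^ 11 := by
  unfold Dom_Q1c pvDomInt at hdom
  simp only [decide_eq_true_eq] at hdom
  have h1 : (n : Int) ≤ 2147483648 := hdom.2
  have h2 : n ≤ 2147483648 := by exact_mod_cast h1
  calc n ≤ 2147483648 := h2
    _ < 10 ^ 11 := by norm_num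

-- ===== VERDICT (by name: the statement is the Claim_ definition above) =====
theorem Q1c_spec : Claim_unchanged_Q1c := by
  intro num hdom hpre hD
  obtain ⟨n, rfl⟩ := Int.eq_ofNat_of_zero_le hpre
  rw [pv_Q1c_eq, pv_Q1c_alt_eq, pv_A_char]
  congr 1
  have hbig : n < 10 ^ 11 := pv_dom_bound n hdom
  by_cases hn : n = 0
  · subst hn; simp [pvStrip]
  · by_cases hm : n % 10 = 0
    · -- trailing zero but no nonzero even digit (else D_ would hold)
      have hnz : pvHasNZ n = false := by
        cases hx : pvHasNZ n
        · rfl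
        · exfalso
          apply hD
          refine ⟨by exact_mod_cast hn, by omega, ?_⟩
          rw [Int.natAbs_natCast]
          exact (pv_hasNZ_iff_bounded n hbig).mp hx
      rw [pv_E_eq_zero_of_not_hasNZ n hnz,
        pv_E_eq_zero_of_not_hasNZ (pvStrip n) (by rw [pv_hasNZ_strip]; exact hnz)]
    · -- no trailing zero: strip is the identity
      rw [pvStrip, dif_neg hn, if_neg hm]

theorem Q1c_changed : Claim_changed_Q1c := by
  unfold Claim_changed_Q1c
  refine ⟨by decide, by decide, ?_, by decide, by decide, by decide⟩
  unfold D_Q1c pvDiffWitness_Q1c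
  exact ⟨by decide, by decide, 1, by decide, by decide⟩

theorem Q1c_tight : Claim_exact_Q1c := by
  intro num hdom hpre hD
  obtain ⟨n, rfl⟩ := Int.eq_ofNat_of_zero_le hpre
  obtain ⟨hne, hmod, hdig⟩ := hD
  rw [Int.natAbs_natCast] at hdig
  have hn : n ≠ 0 := by exact_mod_cast hne
  have hm : n % 10 = 0 := by omega
  have hnz : pvHasNZ n = true := (pv_hasNZ_iff n).mpr (by obtain ⟨k, _, hk⟩ := hdig; exact ⟨k, hk⟩)
  rw [pv_Q1c_eq, pv_Q1c_alt_eq, pv_A_char]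
  intro hcontra
  have hcn : pvE (pvStrip n) = pvE n := by exact_mod_cast hcontra
  have htz : 1 ≤ pvTZ n := by
    rw [pvTZ, dif_neg hn, if_pos hm]; omega
  have hEs : pvE (pvStrip n) ≠ 0 :=
    pv_E_ne_zero_of_hasNZ (pvStrip n) (by rw [pv_hasNZ_strip]; exact hnz)
  have hfac := pv_E_strip n
  rw [← hcn] at hfac
  have h10 : 10 ≤ 10 ^ pvTZ n := by
    calc 10 = 10 ^ 1 := by norm_num
      _ ≤ 10 ^ pvTZ n := Nat.pow_le_pow_right (by norm_num) htz
  nlinarith [Nat.pos_of_ne_zero hEs]
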